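-- pv_equiv track=rewrite | github.com/Seoyoung2/Algorithm_Study | Programmers/Level4/서울에서 경산까지.py | solution
-- ===== SOURCE A (Python) =====
-- def solution(K, travel):
--     n = len(travel)
--     memo = [[0 for _ in range(K+1)] for _ in range(n+1)]
--     for i in range(1, n+1):
--         t_walk, v_walk, t_bike, v_bike = travel[i-1]
--         for j in range(K+1):
--             walk = memo[i-1][j-t_walk]+v_walk if j>=t_walk and memo[i-1][j-t_walk]!=-1 else -1
--             bike = memo[i-1][j-t_bike]+v_bike if j>=t_bike and memo[i-1][j-t_bike]!=-1 else -1
--             memo[i][j]=max(walk, bike)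
--     return memo[n][K]
-- ===== SOURCE B (Python) =====
-- def solution(K, travel):
--     # Two passes over the segments, no (n+1)x(K+1) table:
--     # 1) backward reachability: needed[i] = set of remaining budgets that can
--     #    actually be queried at segment level i (needed[n] = {K});
--     # 2) forward DP computing values only for those reachable budgets.
--     n = len(travel)
--     needed = [set() for _ in range(n + 1)]
--     needed[n].add(K)
--     for i in range(n, 0, -1):
--         t_walk, _, t_bike, _ = travel[i - 1]
--         for j in needed[i]:
--             if j >= t_walk:
--                 needed[i - 1].add(j - t_walk)
--             if j >= t_bike:
--                 needed[i - 1].add(j - t_bike)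
--     val = {j: 0 for j in needed[0]}
--     for i in range(1, n + 1):
--         t_walk, v_walk, t_bike, v_bike = travel[i - 1]
--         val = {j: max(val[j - t_walk] + v_walk if j >= t_walk and val[j - t_walk] != -1 else -1,
--                       val[j - t_bike] + v_bike if j >= t_bike and val[j - t_bike] != -1 else -1)
--                for j in needed[i]}
--     return val[K]
-- ===== Notes on version B (the rewrite author's own statement) =====
-- stated objective: faster
-- what changed: Replaces A's bottom-up (n+1)x(K+1) DP table filling every cell with a two-pass scheme: a backward pass computes the set of reachable remaining budgets per segment level, then a forward pass evaluates the recurrence only on those states.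
import Mathlib
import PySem

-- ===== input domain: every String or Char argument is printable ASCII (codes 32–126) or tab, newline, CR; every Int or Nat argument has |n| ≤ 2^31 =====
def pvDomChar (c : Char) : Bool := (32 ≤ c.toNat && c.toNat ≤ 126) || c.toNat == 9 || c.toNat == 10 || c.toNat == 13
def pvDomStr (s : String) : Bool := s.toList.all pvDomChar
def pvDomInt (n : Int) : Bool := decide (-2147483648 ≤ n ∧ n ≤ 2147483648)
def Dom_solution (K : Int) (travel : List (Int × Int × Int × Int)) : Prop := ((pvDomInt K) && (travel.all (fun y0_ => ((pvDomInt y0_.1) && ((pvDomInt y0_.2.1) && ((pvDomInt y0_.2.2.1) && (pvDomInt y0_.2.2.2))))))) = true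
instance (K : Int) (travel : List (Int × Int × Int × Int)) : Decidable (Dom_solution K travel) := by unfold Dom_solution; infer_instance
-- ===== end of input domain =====

-- B replaces A's bottom-up (n+1)×(K+1) table by a backward pass computing the
-- reachable remaining-budget sets per segment level and a forward pass valuing
-- only those states; equivalence of return values is proved on Pre_.

-- ===== PORT A =====
-- one table cell: max of the walk and bike options read from the previous row
def pvCell (prev : List Int) (q : Int × Int × Int × Int) (j : Int) : Int :=
  let walk := if j ≥ q.1 ∧ PySem.List.pyGetD prev (j - q.1) 0 ≠ -1
              then PySem.List.pyGetD prev (j - q.1) 0 + q.2.1 else -1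
  let bike := if j ≥ q.2.2.1 ∧ PySem.List.pyGetD prev (j - q.2.2.1) 0 ≠ -1
              then PySem.List.pyGetD prev (j - q.2.2.1) 0 + q.2.2.2 else -1
  max walk bike

def solution (K : Int) (travel : List (Int × Int × Int × Int)) : Int :=
  let n : Int := (travel.length : Int)
  let memo : List (List Int) :=
    (PySem.List.pyRange 0 (n + 1) 1).map
      (fun _ => (PySem.List.pyRange 0 (K + 1) 1).map (fun _ => (0 : Int)))
  let memo :=
    (PySem.List.pyRange 1 (n + 1) 1).foldl
      (fun memo i =>
        let q := PySem.List.pyGetD travel (i - 1) (0, 0, 0, 0)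
        let prev := PySem.List.pyGetD memo (i - 1) []
        -- inner for-j loop: memo[i][j] only reads row i-1, so the written row is this map
        let row := (PySem.List.pyRange 0 (K + 1) 1).map (fun j => pvCell prev q j)
        PySem.List.pySetD memo i row)
      memo
  PySem.List.pyGetD (PySem.List.pyGetD memo n []) K 0

-- ===== PORT B =====
-- backward pass body: the set of budgets needed one level down
def pvStep (q : Int × Int × Int × Int) (s : PySem.Set Int) : PySem.Set Int :=
  s.foldl
    (fun acc j =>
      let acc1 := if q.1 ≤ j then PySem.Set.add acc (j - q.1) else acc
      if q.2.2.1 ≤ j then PySem.Set.add acc1 (j - q.2.2.1) else acc1)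
    PySem.Set.empty

-- needed[n - d] of Source B: the budgets reachable d levels below the top
def pvNeed (K : Int) (travel : List (Int × Int × Int × Int)) : Nat → PySem.Set Int
  | 0 => PySem.Set.ofList [K]
  | d + 1 =>
    pvStep (PySem.List.pyGetD travel ((travel.length - (d + 1) : Nat) : Int) (0, 0, 0, 0))
      (pvNeed K travel d)

-- forward pass: val after i segments, keyed by the reachable budgets needed[i]
-- (Source B's val[j-t] lookups always hit existing keys, so getD's default is never used)
def pvVal (K : Int) (travel : List (Int × Int × Int × Int)) : Nat → PySem.Dict Int Int
  | 0 => (pvNeed K travel travel.length).foldl (fun d j => d.insert j 0) PySem.Dict.empty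
  | i + 1 =>
    let q := PySem.List.pyGetD travel (i : Int) (0, 0, 0, 0)
    let prev := pvVal K travel i
    (pvNeed K travel (travel.length - (i + 1))).foldl
      (fun d j =>
        let walk := if q.1 ≤ j ∧ prev.getD (j - q.1) 0 ≠ -1
                    then prev.getD (j - q.1) 0 + q.2.1 else -1
        let bike := if q.2.2.1 ≤ j ∧ prev.getD (j - q.2.2.1) 0 ≠ -1
                    then prev.getD (j - q.2.2.1) 0 + q.2.2.2 else -1
        d.insert j (max walk bike))
      PySem.Dict.empty

def solution_alt (K : Int) (travel : List (Int × Int × Int × Int)) : Int :=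
  (pvVal K travel travel.length).getD K 0

-- ===== PRECONDITION & SPEC =====
-- A raises IndexError when K < 0 (the table rows are empty) or when some travel
-- time is negative (memo[i-1][j-t] then overruns the row); Pre_ is exactly A's
-- return domain.
def Pre_solution (K : Int) (travel : List (Int × Int × Int × Int)) : Prop :=
  0 ≤ K ∧ ∀ q ∈ travel, 0 ≤ q.1 ∧ 0 ≤ q.2.2.1
instance (K : Int) (travel : List (Int × Int × Int × Int)) : Decidable (Pre_solution K travel) := by unfold Pre_solution; infer_instance

def pvWitness_solution : Int × (List (Int × Int × Int × Int)) := (4, [(1, 2, 2, 5), (3, 1, 1, 0)])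

def Spec_solution (K : Int) (travel : List (Int × Int × Int × Int)) (out : Int) : Prop := out = solution_alt K travel
instance (K : Int) (travel : List (Int × Int × Int × Int)) (out : Int) : Decidable (Spec_solution K travel out) := by unfold Spec_solution; infer_instance

-- ===== CLAIM (what is proved, stated in full; the proofs are below) =====
def Claim_equal_solution : Prop := ∀ (K : Int) (travel : List (Int × Int × Int × Int)), Dom_solution K travel → Pre_solution K travel → Spec_solution K travel (solution K travel)

-- ===== LEMMAS AND PROOFS =====

-- the common recurrence both programs compute: best value over i segments, budget j
def pvGo (travel : List (Int × Int × Int × Int)) : Nat → Int → Int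
  | 0, _ => 0
  | i + 1, j =>
    match travel[i]? with
    | none => 0
    | some (tw, vw, tb, vb) =>
      let walk := if tw ≤ j then
                    (let s := pvGo travel i (j - tw);
                     if s ≠ -1 then s + vw else -1)
                  else -1
      let bike := if tb ≤ j then
                    (let s := pvGo travel i (j - tb);
                     if s ≠ -1 then s + vb else -1)
                  else -1
      max walk bike


-- row i of A's finished table, as a function
def pvRowA (K : Int) (travel : List (Int × Int × Int × Int)) : Nat → List Int
  | 0 => (PySem.List.pyRange 0 (K + 1) 1).map (fun _ => (0 : Int))
  | i + 1 =>
    (PySem.List.pyRange 0 (K + 1) 1).map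
      (fun j => pvCell (pvRowA K travel i) (PySem.List.pyGetD travel (i : Int) (0, 0, 0, 0)) j)

-- the memo list after the first m outer iterations
def pvMemoAt (K : Int) (travel : List (Int × Int × Int × Int)) (n m : Nat) : List (List Int) :=
  (List.range (n + 1)).map (fun i => if i ≤ m then pvRowA K travel i else pvRowA K travel 0)

theorem pvMemoAt_get (K : Int) (travel : List (Int × Int × Int × Int)) (n m i : Nat)
    (hi : i ≤ n) :
    PySem.List.pyGetD (pvMemoAt K travel n m) (i : Int) [] =
      (if i ≤ m then pvRowA K travel i else pvRowA K travel 0) := by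
  unfold pvMemoAt
  rw [PySem.List.pyGetD_natCast]
  rw [List.getD_eq_getElem?_getD]
  rw [List.getElem?_map]
  rw [List.getElem?_range (by omega : i < n + 1)]
  rfl

theorem pvMemoAt_zero (K : Int) (travel : List (Int × Int × Int × Int)) (n : Nat) :
    ((PySem.List.pyRange 0 ((n : Int) + 1) 1).map
        (fun _ => (PySem.List.pyRange 0 (K + 1) 1).map (fun _ => (0 : Int)))) =
      pvMemoAt K travel n 0 := by
  have h : ((n : Int) + 1) = ((n + 1 : Nat) : Int) := by push_cast; ring
  rw [h, PySem.List.pyRange_zero_natCast, List.map_map]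
  unfold pvMemoAt
  apply List.ext_getElem
  · simp
  · intro i h1 h2
    simp only [List.getElem_map, List.getElem_range, Function.comp]
    by_cases h0 : i ≤ 0
    · rw [if_pos h0]
      have hz : i = 0 := by omega
      subst hz; rfl
    · rw [if_neg h0]; rfl

theorem pvFold_inv (K : Int) (travel : List (Int × Int × Int × Int)) (n : Nat)
    (hn : n = travel.length) :
    ∀ m : Nat, m ≤ n →
      (PySem.List.pyRange 1 ((m : Int) + 1) 1).foldl
        (fun memo i =>
          let q := PySem.List.pyGetD travel (i - 1) (0, 0, 0, 0)
          let prev := PySem.List.pyGetD memo (i - 1) []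
          let row := (PySem.List.pyRange 0 (K + 1) 1).map (fun j => pvCell prev q j)
          PySem.List.pySetD memo i row)
        (pvMemoAt K travel n 0) = pvMemoAt K travel n m := by
  intro m
  induction m with
  | zero => intro _; rw [PySem.List.pyRange_one_eq_nil (a := 1) (b := ((0:Nat):Int)+1) (by norm_num)]; rfl
  | succ m ih =>
    intro hm
    have h1 : ((m + 1 : Nat) : Int) + 1 = ((m : Int) + 1) + 1 := by push_cast; ring
    rw [h1, PySem.List.pyRange_one_succ_right (a := 1) (b := (m:Int)+1) (by omega), List.foldl_append,
      ih (by omega)]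
    show PySem.List.pySetD (pvMemoAt K travel n m) ((m : Int) + 1) _ = _
    have hidx : ((m : Int) + 1) - 1 = ((m : Nat) : Int) := by ring
    rw [hidx, pvMemoAt_get K travel n m m (by omega)]
    simp only [le_refl, if_pos]
    have hrow : ((PySem.List.pyRange 0 (K + 1) 1).map
        (fun j => pvCell (pvRowA K travel m) (PySem.List.pyGetD travel (m : Int) (0,0,0,0)) j)) =
        pvRowA K travel (m + 1) := rfl
    rw [hrow]
    have h2 : ((m : Int) + 1) = (((m + 1 : Nat)) : Int) := by push_cast; ring
    rw [h2, PySem.List.pySetD_natCast]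
    apply List.ext_getElem
    · simp [pvMemoAt]
    · intro i h3 h4
      simp only [pvMemoAt, List.getElem_set, List.getElem_map, List.getElem_range]
      have hi : i < n + 1 := by simpa [pvMemoAt] using h3
      by_cases hcase : m + 1 = i
      · rw [if_pos hcase, if_pos (by omega), hcase]
      · rw [if_neg hcase]
        by_cases hle : i ≤ m
        · rw [if_pos hle, if_pos (by omega)]
        · rw [if_neg hle, if_neg (by omega)]

theorem pvRow_eq_go (K : Int) (travel : List (Int × Int × Int × Int))
    (ht : ∀ q ∈ travel, 0 ≤ q.1 ∧ 0 ≤ q.2.2.1) :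
    ∀ i : Nat, i ≤ travel.length → ∀ j : Int, 0 ≤ j → j ≤ K →
      PySem.List.pyGetD (pvRowA K travel i) j 0 = pvGo travel i j := by
  intro i
  induction i with
  | zero =>
    intro _ j hj0 hjK
    rw [pvRowA, PySem.List.pyGetD_map_pyRange_of_nonneg _ _ _ _ hj0 (by omega)]
    rfl
  | succ i ih =>
    intro hi j hj0 hjK
    have hilt : i < travel.length := by omega
    rw [pvRowA, PySem.List.pyGetD_map_pyRange_of_nonneg _ _ _ _ hj0 (by omega)]
    have hq : PySem.List.pyGetD travel (i : Int) (0,0,0,0) = travel[i] :=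
      PySem.List.pyGetD_ofNat _ _ _ hilt
    have hqget : travel[i]? = some travel[i] := List.getElem?_eq_getElem hilt
    rcases hmem : travel[i] with ⟨tw, vw, tb, vb⟩
    have hmemq : (tw, vw, tb, vb) ∈ travel := hmem ▸ List.getElem_mem hilt
    have htwb := ht _ hmemq
    have htw : 0 ≤ tw := htwb.1
    have htb : 0 ≤ tb := htwb.2
    rw [pvGo, hqget, hmem]
    rw [pvCell, hq, hmem]
    simp only
    by_cases hw : tw ≤ j
    · rw [ih (by omega) (j - tw) (by omega) (by omega)]
      by_cases hb : tb ≤ j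
      · rw [ih (by omega) (j - tb) (by omega) (by omega)]
        simp [hw, hb]
      · simp [hw, hb]
    · by_cases hb : tb ≤ j
      · rw [ih (by omega) (j - tb) (by omega) (by omega)]
        simp [hw, hb]
      · simp [hw, hb]

-- membership is preserved by the pvStep fold
theorem pvStep_foldl_mono (q : Int × Int × Int × Int) (l : List Int) (acc : PySem.Set Int)
    (x : Int) (hx : x ∈ acc) :
    x ∈ l.foldl
      (fun acc j =>
        let acc1 := if q.1 ≤ j then PySem.Set.add acc (j - q.1) else acc
        if q.2.2.1 ≤ j then PySem.Set.add acc1 (j - q.2.2.1) else acc1)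
      acc := by
  induction l generalizing acc with
  | nil => exact hx
  | cons j tl ih =>
    apply ih
    simp only
    split_ifs <;> simp [PySem.Set.mem_add, hx]

theorem mem_pvStep_walk (q : Int × Int × Int × Int) (s : PySem.Set Int) (j : Int)
    (hj : j ∈ s) (hg : q.1 ≤ j) : j - q.1 ∈ pvStep q s := by
  unfold pvStep
  obtain ⟨l1, l2, rfl⟩ := List.append_of_mem hj
  rw [List.foldl_append, List.foldl_cons]
  apply pvStep_foldl_mono
  simp only
  split_ifs <;> simp [PySem.Set.mem_add]

theorem mem_pvStep_bike (q : Int × Int × Int × Int) (s : PySem.Set Int) (j : Int)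
    (hj : j ∈ s) (hg : q.2.2.1 ≤ j) : j - q.2.2.1 ∈ pvStep q s := by
  unfold pvStep
  obtain ⟨l1, l2, rfl⟩ := List.append_of_mem hj
  rw [List.foldl_append, List.foldl_cons]
  apply pvStep_foldl_mono
  simp only
  split_ifs <;> simp [PySem.Set.mem_add]

-- lookup in a dict built by inserting f j for every j of a list
theorem getD_foldl_insert_fn (f : Int → Int) (l : List Int) (d0 : PySem.Dict Int Int)
    (k dflt : Int) :
    (l.foldl (fun d j => d.insert j (f j)) d0).getD k dflt =
      if k ∈ l then f k else d0.getD k dflt := by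
  induction l generalizing d0 with
  | nil => simp
  | cons j tl ih =>
    rw [List.foldl_cons, ih, PySem.Dict.getD_insert]
    by_cases htl : k ∈ tl
    · simp [htl]
    · by_cases hkj : k = j
      · simp [hkj]
      · simp [htl, hkj]

theorem pvVal_eq_go (K : Int) (travel : List (Int × Int × Int × Int)) :
    ∀ i : Nat, i ≤ travel.length → ∀ j : Int, j ∈ pvNeed K travel (travel.length - i) →
      (pvVal K travel i).getD j 0 = pvGo travel i j := by
  intro i
  induction i with
  | zero =>
    intro _ j hj
    rw [Nat.sub_zero] at hj
    rw [pvVal, getD_foldl_insert_fn (fun _ => 0) _ _ _ _, if_pos hj]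
    rfl
  | succ i ih =>
    intro hi j hj
    rw [pvVal]
    simp only
    rw [getD_foldl_insert_fn _ _ _ _ _, if_pos hj]
    have hilt : i < travel.length := by omega
    have hq : PySem.List.pyGetD travel (i : Int) (0, 0, 0, 0) = travel[i] :=
      PySem.List.pyGetD_ofNat _ _ _ hilt
    have hqget : travel[i]? = some travel[i] := List.getElem?_eq_getElem hilt
    rcases hmem : travel[i] with ⟨tw, vw, tb, vb⟩
    -- the level below: needed[i] = pvNeed (n - i), whose step quad is travel[i]
    have hsucc : travel.length - i = (travel.length - (i + 1)) + 1 := by omega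
    have hidx : (travel.length - ((travel.length - (i + 1)) + 1) : Nat) = i := by omega
    have hneed : pvNeed K travel (travel.length - i) =
        pvStep (tw, vw, tb, vb) (pvNeed K travel (travel.length - (i + 1))) := by
      rw [hsucc, pvNeed, hidx, hq, hmem]
    rw [pvGo, hqget, hmem, hq, hmem]
    simp only
    by_cases hw : tw ≤ j
    · have hmw : j - tw ∈ pvNeed K travel (travel.length - i) := by
        rw [hneed]; exact mem_pvStep_walk (tw, vw, tb, vb) _ j hj hw
      rw [ih (by omega) (j - tw) hmw]
      by_cases hb : tb ≤ j
      · have hmb : j - tb ∈ pvNeed K travel (travel.length - i) := by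
          rw [hneed]; exact mem_pvStep_bike (tw, vw, tb, vb) _ j hj hb
        rw [ih (by omega) (j - tb) hmb]
        simp [hw, hb]
      · simp [hw, hb]
    · by_cases hb : tb ≤ j
      · have hmb : j - tb ∈ pvNeed K travel (travel.length - i) := by
          rw [hneed]; exact mem_pvStep_bike (tw, vw, tb, vb) _ j hj hb
        rw [ih (by omega) (j - tb) hmb]
        simp [hw, hb]
      · simp [hw, hb]

-- ===== VERDICT (by name: the statement is the Claim_ definition above) =====
theorem solution_spec : Claim_equal_solution := by
  intro K travel _ hpre
  obtain ⟨hK, ht⟩ := hpre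
  show solution K travel = solution_alt K travel
  unfold solution solution_alt
  simp only
  rw [pvMemoAt_zero K travel travel.length,
    pvFold_inv K travel travel.length rfl travel.length (le_refl _),
    pvMemoAt_get K travel travel.length travel.length travel.length (le_refl _),
    if_pos (le_refl _),
    pvRow_eq_go K travel ht travel.length (le_refl _) K hK (le_refl _),
    pvVal_eq_go K travel travel.length (le_refl _) K
      (by rw [Nat.sub_self]; exact (PySem.Set.mem_ofList _ _).mpr (List.mem_singleton.mpr rfl))]
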